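-- pv_equiv track=rewrite | github.com/alexeyum/sound-event-finder | model/lib/util.py | continuos_segments
-- ===== SOURCE A (Python) =====
-- def continuos_segments(values):
--
--     """Find intervals of `True` values in a boolean array."""
--
--     start = -1
--     for i in range(len(values)):
--         if values[i]:
--             if start == -1:
--                 start = i
--         else:
--             if start != -1:
--                 yield (start, i)
--             start = -1
--     if start != -1:
--         yield (start, len(values))
-- ===== SOURCE B (Python) =====
-- def continuos_segments(values):
--     """Find intervals of `True` values in a boolean array (run-length scan)."""
--     n = len(values)
--     idx = 0
--     while idx < n:
--         j = idx
--         while j < n and bool(values[j]) == bool(values[idx]):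
--             j += 1
--         if values[idx]:
--             yield (idx, j)
--         idx = j
-- ===== Notes on version B (the rewrite author's own statement) =====
-- stated objective: alternative
-- what changed: Replaces the per-element start/-1 state machine with a two-pointer run-length scan that finds each maximal run of equal truth values at once and yields the run's bounds when the run is True.
import Mathlib
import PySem

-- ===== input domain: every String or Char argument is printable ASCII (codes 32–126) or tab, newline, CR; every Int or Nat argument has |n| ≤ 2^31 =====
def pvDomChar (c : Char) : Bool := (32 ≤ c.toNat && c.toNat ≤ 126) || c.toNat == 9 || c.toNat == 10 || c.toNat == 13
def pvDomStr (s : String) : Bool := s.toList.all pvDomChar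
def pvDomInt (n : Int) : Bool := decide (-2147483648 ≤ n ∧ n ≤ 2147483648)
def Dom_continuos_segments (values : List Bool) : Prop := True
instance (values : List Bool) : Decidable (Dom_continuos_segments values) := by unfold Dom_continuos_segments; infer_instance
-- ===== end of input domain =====

-- B replaces A's per-element start/-1 state machine with a two-pointer run-length scan (objective: alternative).
-- Both Pythons are generators; equivalence is about the yielded sequence, collected as a list.

-- ===== PORT A =====
-- A's for-loop over range(len(values)) with state `start`, one list element per iteration;
-- the trailing `if start != -1: yield (start, len(values))` is the base case.
def aGo (vs : List Bool) (i : Int) (start : Int) : List (Int × Int) :=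
  match vs with
  | [] => if start ≠ -1 then [(start, i)] else []
  | v :: rest =>
      if v then
        aGo rest (i + 1) (if start = -1 then i else start)
      else
        (if start ≠ -1 then [(start, i)] else []) ++ aGo rest (i + 1) (-1)

def continuos_segments (values : List Bool) : List (Int × Int) :=
  aGo values 0 (-1)

-- ===== PORT B =====
-- inner while loop: `while j < n and bool(values[j]) == bool(values[idx])` with b = values[idx]
def bScan (values : List Bool) (v : Bool) (j : Nat) : Nat :=
  if h : j < values.length ∧ values.getD j false = v then bScan values v (j + 1) else j
termination_by values.length - j
decreasing_by omega

-- bScan only moves forward (cited by bGo's termination proof)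
theorem bScan_ge (values : List Bool) (v : Bool) (j : Nat) : j <= bScan values v j := by
  induction j using bScan.induct values v with
  | case1 j hj ih => rw [bScan, dif_pos hj]; omega
  | case2 j hj => rw [bScan, dif_neg hj]

theorem bScan_gt (values : List Bool) (idx : Nat) (h : idx < values.length) :
    idx < bScan values (values.getD idx false) idx := by
  rw [bScan, dif_pos (And.intro h rfl)]
  have := bScan_ge values (values.getD idx false) (idx + 1)
  omega

-- outer while loop over idx
def bGo (values : List Bool) (idx : Nat) : List (Int × Int) :=
  if h : idx < values.length then
    let j := bScan values (values.getD idx false) idx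
    (if values.getD idx false then [((idx : Int), (j : Int))] else []) ++ bGo values j
  else []
termination_by values.length - idx
decreasing_by
  have h1 := bScan_gt values idx h
  omega

def continuos_segments_alt (values : List Bool) : List (Int × Int) :=
  bGo values 0

-- ===== PRECONDITION & SPEC =====
def Spec_continuos_segments (values : List Bool) (out : List (Int × Int)) : Prop := out = continuos_segments_alt values
instance (values : List Bool) (out : List (Int × Int)) : Decidable (Spec_continuos_segments values out) := by unfold Spec_continuos_segments; infer_instance

-- ===== CLAIM (what is proved, stated in full; the proofs are below) =====
def Claim_equal_continuos_segments : Prop := ∀ (values : List Bool), Dom_continuos_segments values → Spec_continuos_segments values (continuos_segments values)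

-- ===== LEMMAS AND PROOFS =====

theorem bScan_le_len (values : List Bool) (v : Bool) (j : Nat) (hj : j ≤ values.length) :
    bScan values v j ≤ values.length := by
  induction j using bScan.induct values v with
  | case1 j hj' ih => rw [bScan, dif_pos hj']; exact ih (by omega)
  | case2 j hj' => rw [bScan, dif_neg hj']; exact hj

-- every position in [j, bScan values v j) holds v
theorem bScan_run (values : List Bool) (v : Bool) (j : Nat) :
    ∀ t, j ≤ t → t < bScan values v j → values.getD t false = v := by
  induction j using bScan.induct values v with
  | case1 j hj ih =>
      intro t ht1 ht2
      rw [bScan, dif_pos hj] at ht2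
      rcases Nat.eq_or_lt_of_le ht1 with h | h
      · exact h ▸ hj.2
      · exact ih t h ht2
  | case2 j hj =>
      intro t ht1 ht2
      rw [bScan, dif_neg hj] at ht2; omega

-- the scan stops at the end or at a value ≠ v
theorem bScan_stop (values : List Bool) (v : Bool) (j : Nat) :
    bScan values v j = values.length ∨
      (bScan values v j < values.length ∧ values.getD (bScan values v j) false ≠ v) ∨
      values.length < j := by
  induction j using bScan.induct values v with
  | case1 j hj ih =>
      rw [bScan, dif_pos hj]
      rcases ih with h | h | h
      · exact Or.inl h
      · exact Or.inr (Or.inl h)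
      · exact absurd hj.1 (by omega)
  | case2 j hj =>
      rw [bScan, dif_neg hj]
      by_cases h1 : j < values.length
      · right; left; exact ⟨h1, by intro hv; exact hj ⟨h1, hv⟩⟩
      · rcases Nat.eq_or_lt_of_le (Nat.le_of_not_lt h1) with h | h
        · left; omega
        · right; right; exact h

-- A skips a run of False values without emitting anything
theorem lemF (values : List Bool) (k : Nat) :
    ∀ m : Nat, m + k ≤ values.length →
      (∀ t, m ≤ t → t < m + k → values.getD t false = false) →
      aGo (values.drop m) (m : Int) (-1) = aGo (values.drop (m + k)) ((m + k : Nat) : Int) (-1) := by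
  induction k with
  | zero => intro m _ _; simp
  | succ k ih =>
      intro m hlen hrun
      have hm : m < values.length := by omega
      have hdrop : values.drop m = values.getD m false :: values.drop (m + 1) := by
        rw [List.getD_eq_getElem _ _ hm, List.drop_eq_getElem_cons hm]
      have hfalse : values.getD m false = false := hrun m le_rfl (by omega)
      rw [hdrop, hfalse, aGo]
      have harith : ((m : Int) + 1) = ((m + 1 : Nat) : Int) := by push_cast; ring
      have hrec := ih (m + 1) (by omega) (fun t h1 h2 => hrun t (by omega) (by omega))
      have heq : m + 1 + k = m + (k + 1) := by omega
      rw [heq] at hrec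
      simp only [Bool.false_eq_true, if_false, ne_eq, not_true_eq_false, List.nil_append]
      rw [harith, hrec]

-- A inside a True run with start s ≠ -1: emits (s, end of run) and resets
theorem lemT (values : List Bool) (k : Nat) :
    ∀ (m : Nat) (s : Int), s ≠ -1 → m + k ≤ values.length →
      (∀ t, m ≤ t → t < m + k → values.getD t false = true) →
      (m + k = values.length ∨ values.getD (m + k) false = false) →
      aGo (values.drop m) (m : Int) s =
        (s, ((m + k : Nat) : Int)) :: aGo (values.drop (m + k)) ((m + k : Nat) : Int) (-1) := by
  induction k with
  | zero =>
      intro m s hs hlen _ hstop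
      simp only [Nat.add_zero] at hstop ⊢
      by_cases hm : m < values.length
      · have h : values.getD m false = false := by
          rcases hstop with h | h
          · omega
          · exact h
        have hdrop : values.drop m = values.getD m false :: values.drop (m + 1) := by
          rw [List.getD_eq_getElem _ _ hm, List.drop_eq_getElem_cons hm]
        conv_lhs => rw [hdrop, h, aGo]
        conv_rhs => rw [hdrop, h, aGo]
        simp [hs]
      · have hm' : m = values.length := by omega
        subst hm'
        rw [List.drop_length, aGo]
        conv_rhs => rw [aGo]
        simp [hs]
  | succ k ih =>
      intro m s hs hlen hrun hstop
      have hm : m < values.length := by omega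
      have hdrop : values.drop m = values.getD m false :: values.drop (m + 1) := by
        rw [List.getD_eq_getElem _ _ hm, List.drop_eq_getElem_cons hm]
      have htrue : values.getD m false = true := hrun m le_rfl (by omega)
      rw [hdrop, htrue]
      rw [aGo]
      simp only [if_neg hs]
      have harith : ((m : Int) + 1) = ((m + 1 : Nat) : Int) := by push_cast; ring
      rw [harith, ih (m + 1) s hs (by omega)
          (fun t h1 h2 => hrun t (by omega) (by omega))
          (by have : m + 1 + k = m + (k + 1) := by omega
              rw [this]; exact hstop)]
      have : m + 1 + k = m + (k + 1) := by omega
      rw [this]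
      simp

-- main lemma: A's state machine from position idx (not in a run) equals B's run scan from idx
theorem lemMain (values : List Bool) (d : Nat) :
    ∀ idx : Nat, values.length - idx ≤ d → idx ≤ values.length →
      aGo (values.drop idx) (idx : Int) (-1) = bGo values idx := by
  induction d with
  | zero =>
      intro idx hd hle
      have : idx = values.length := by omega
      subst this
      rw [List.drop_length, bGo]
      simp [aGo]
  | succ d ih =>
      intro idx hd hle
      by_cases hidx : idx < values.length
      · have hdrop : values.drop idx = values.getD idx false :: values.drop (idx + 1) := by
          rw [List.getD_eq_getElem _ _ hidx, List.drop_eq_getElem_cons hidx]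
        set v := values.getD idx false with hv
        set j := bScan values v idx with hj
        have hjge : idx + 1 ≤ j := by
          rw [hj, bScan, dif_pos (And.intro hidx hv.symm)]
          have := bScan_ge values v (idx + 1); omega
        have hjle : j ≤ values.length := bScan_le_len values v idx (by omega)
        have hrun : ∀ t, idx ≤ t → t < j → values.getD t false = v := bScan_run values v idx
        have hstop : j = values.length ∨ (j < values.length ∧ values.getD j false ≠ v) := by
          rcases bScan_stop values v idx with h | h | h
          · exact Or.inl h
          · exact Or.inr h
          · omega
        have hbGo : bGo values idx =
            (if v then [((idx : Int), (j : Int))] else []) ++ bGo values j := by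
          rw [bGo, dif_pos hidx]
        cases hvv : v with
        | false =>
            -- a run of False: A emits nothing across it
            have hk : idx + (j - idx) = j := by omega
            have := lemF values (j - idx) idx (by omega)
              (fun t h1 h2 => by rw [hrun t h1 (by omega), hvv])
            rw [hk] at this
            rw [this, ih j (by omega) hjle, hbGo, hvv]
            simp
        | true =>
            -- a run of True from idx to j
            rw [hdrop, hvv]
            rw [show aGo (true :: values.drop (idx + 1)) (idx : Int) (-1) =
                aGo (values.drop (idx + 1)) ((idx : Int) + 1) (idx : Int) from by rw [aGo]; simp]
            have hk : idx + 1 + (j - (idx + 1)) = j := by omega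
            have hrun' : ∀ t, idx + 1 ≤ t → t < idx + 1 + (j - (idx + 1)) → values.getD t false = true :=
              fun t h1 h2 => (hrun t (by omega) (by omega)).trans hvv
            have hstop' : idx + 1 + (j - (idx + 1)) = values.length ∨
                values.getD (idx + 1 + (j - (idx + 1))) false = false := by
              rw [hk]
              rcases hstop with h | ⟨_, hne⟩
              · exact Or.inl h
              · right; rw [hvv] at hne; simpa using hne
            have hT := lemT values (j - (idx + 1)) (idx + 1) (idx : Int) (by omega) (by omega) hrun' hstop'
            rw [hk] at hT
            have hcast : ((idx : Int) + 1) = ((idx + 1 : Nat) : Int) := by push_cast; ring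
            rw [hcast, hT, ih j (by omega) hjle, hbGo, hvv]
            simp
      · have : idx = values.length := by omega
        subst this
        rw [List.drop_length, bGo]
        simp [aGo]

-- ===== VERDICT (by name: the statement is the Claim_ definition above) =====
theorem continuos_segments_spec : Claim_equal_continuos_segments := by
  intro values _
  unfold Spec_continuos_segments continuos_segments continuos_segments_alt
  have := lemMain values values.length 0 (by omega) (by omega)
  simpa using this
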